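-- pv_equiv track=rewrite | github.com/MastewalB/a2sv-competitive-programming | Contest/contest/Next-Phase/Contest-4/E.py | count
-- ===== SOURCE A (Python) =====
-- def count(array, k, n):
--     count = 0
--
--     left = 0
--     for i in range(n):
--         if i > 0 and array[i] * 2 <= array[i - 1]:
--             left = i
--         if i - left == k:
--             count += 1
--             left += 1
--
--     return count
-- ===== SOURCE B (Python) =====
-- def count(array, k, n):
--     # Staged: first collect the break positions, then sum a closed-form
--     # contribution max(0, run_len - k) over the resulting run boundaries.
--     if k < 0:
--         return 0
--     breaks = [i for i in range(1, n) if array[i] * 2 <= array[i - 1]]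
--     bounds = [0] + breaks + [n]
--     return sum(max(0, b - a - k) for a, b in zip(bounds, bounds[1:]))
-- ===== Notes on version B (the rewrite author's own statement) =====
-- stated objective: alternative
-- what changed: Replaced A's single stateful sliding-window scan (count,left updated per element) by two stages: a list comprehension collecting break positions, then a closed-form sum max(0, run_len - k) over consecutive run boundaries.
-- outside the precondition, e.g. on count([1], 2, 3): A raises IndexError, B raises IndexError
import Mathlib
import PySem

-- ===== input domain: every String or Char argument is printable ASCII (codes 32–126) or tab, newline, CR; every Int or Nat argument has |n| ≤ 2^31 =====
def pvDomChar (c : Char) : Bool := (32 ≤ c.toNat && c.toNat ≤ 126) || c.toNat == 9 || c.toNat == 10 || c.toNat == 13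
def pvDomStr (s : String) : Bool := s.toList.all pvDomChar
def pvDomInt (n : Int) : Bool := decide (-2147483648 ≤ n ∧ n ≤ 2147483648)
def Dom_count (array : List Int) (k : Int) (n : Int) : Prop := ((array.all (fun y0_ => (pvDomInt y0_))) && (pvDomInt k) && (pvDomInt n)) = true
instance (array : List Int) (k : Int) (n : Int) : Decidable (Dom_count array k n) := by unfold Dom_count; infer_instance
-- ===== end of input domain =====

-- B replaces A's single stateful sliding-window scan by two stages: collect break positions,
-- then sum the closed-form contribution max(0, run_len - k) per run (objective: alternative).

-- ===== PORT A =====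
-- loop body of A: state (count, left); array[i] is ported as pyGetD (in range on Pre_, where Python does not raise)
def stepA (array : List Int) (k : Int) (st : Int × Int) (i : Int) : Int × Int :=
  let left := if 0 < i ∧ PySem.List.pyGetD array i 0 * 2 ≤ PySem.List.pyGetD array (i - 1) 0 then i else st.2
  if i - left = k then (st.1 + 1, left + 1) else (st.1, left)

def count (array : List Int) (k : Int) (n : Int) : Int :=
  ((PySem.List.pyRange 0 n 1).foldl (stepA array k) (0, 0)).1

-- ===== PORT B =====
def count_alt (array : List Int) (k : Int) (n : Int) : Int :=
  if k < 0 then 0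
  else
    let breaks := (PySem.List.pyRange 1 n 1).filter
      (fun i => decide (PySem.List.pyGetD array i 0 * 2 ≤ PySem.List.pyGetD array (i - 1) 0))
    let bounds := 0 :: (breaks ++ [n])
    (bounds.zip bounds.tail).foldl (fun acc p => acc + max 0 (p.2 - p.1 - k)) 0

-- ===== PRECONDITION & SPEC =====
-- Pre_ excludes exactly the inputs where Python A raises IndexError: for n ≥ 2 the loop reads
-- array[n-1], so n must not exceed len(array) (n ≤ 1 touches no element and always returns).
def Pre_count (array : List Int) (k : Int) (n : Int) : Prop := n ≤ 1 ∨ n ≤ (array.length : Int)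
instance (array : List Int) (k : Int) (n : Int) : Decidable (Pre_count array k n) := by unfold Pre_count; infer_instance
def pvWitness_count : List Int × Int × Int := ([5, 4, 9, 3, 6], 2, 5)

def Spec_count (array : List Int) (k : Int) (n : Int) (out : Int) : Prop := out = count_alt array k n
instance (array : List Int) (k : Int) (n : Int) (out : Int) : Decidable (Spec_count array k n out) := by unfold Spec_count; infer_instance

-- ===== CLAIM (what is proved, stated in full; the proofs are below) =====
def Claim_equal_count : Prop := ∀ (array : List Int) (k : Int) (n : Int), Dom_count array k n → Pre_count array k n → Spec_count array k n (count array k n)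

-- ===== LEMMAS AND PROOFS =====

-- proof-only intermediate: a fold with B's old-style pair state, bridging A's scan to B's staged sum
def stepB (array : List Int) (k : Int) (st : Int × Int) (i : Int) : Int × Int :=
  if 0 < i ∧ PySem.List.pyGetD array i 0 * 2 ≤ PySem.List.pyGetD array (i - 1) 0 then
    (st.1 + max 0 ((i - st.2) - k), i)
  else st

-- proof-only: the per-run sum over boundary list a :: l
def pvAux (k a : Int) : List Int → Int
  | [] => 0
  | b :: bs => max 0 (b - a - k) + pvAux k b bs

theorem pvZipFoldl (k : Int) (c a : Int) (l : List Int) :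
    ((a :: l).zip l).foldl (fun acc p => acc + max 0 (p.2 - p.1 - k)) c = c + pvAux k a l := by
  induction l generalizing a c with
  | nil => simp [pvAux]
  | cons b bs ih =>
    simp only [List.zip_cons_cons, List.foldl_cons, pvAux]
    rw [ih (c + max 0 (b - a - k)) b]
    ring

theorem pvAux_append (k a x : Int) (l : List Int) :
    pvAux k a (l ++ [x]) = pvAux k a l + max 0 (x - l.getLastD a - k) := by
  induction l generalizing a with
  | nil => simp [pvAux]
  | cons b bs ih =>
    simp only [List.cons_append, pvAux, ih b, List.getLastD_cons]
    ring

-- the pair-state fold computes (per-run sum of breaks so far, last break position)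
theorem pvBfold (array : List Int) (k : Int) (N : Nat) :
    (PySem.List.pyRange 0 (N : Int) 1).foldl (stepB array k) (0, 0)
      = (pvAux k 0 ((PySem.List.pyRange 1 (N : Int) 1).filter
            (fun i => decide (PySem.List.pyGetD array i 0 * 2 ≤ PySem.List.pyGetD array (i - 1) 0))),
         ((PySem.List.pyRange 1 (N : Int) 1).filter
            (fun i => decide (PySem.List.pyGetD array i 0 * 2 ≤ PySem.List.pyGetD array (i - 1) 0))).getLastD 0) := by
  induction N with
  | zero =>
    simp [PySem.List.pyRange_one_eq_nil (by norm_num : (0:Int) ≤ 0),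
          PySem.List.pyRange_one_eq_nil (by norm_num : (0:Int) ≤ 1), pvAux]
  | succ N ih =>
    have hsplit : PySem.List.pyRange 0 ((N + 1 : Nat) : Int) 1
        = PySem.List.pyRange 0 (N : Int) 1 ++ [(N : Int)] := by
      push_cast
      exact PySem.List.pyRange_one_succ_right (by positivity)
    rw [hsplit, List.foldl_append, ih]
    rcases Nat.eq_zero_or_pos N with h0 | hpos
    · subst h0
      simp [PySem.List.pyRange_one_eq_nil (by norm_num : (1:Int) ≤ 1), pvAux, stepB]
    · have h1N : (1 : Int) ≤ (N : Int) := by exact_mod_cast hpos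
      have hsplit2 : PySem.List.pyRange 1 ((N + 1 : Nat) : Int) 1
          = PySem.List.pyRange 1 (N : Int) 1 ++ [(N : Int)] := by
        push_cast
        exact PySem.List.pyRange_one_succ_right h1N
      rw [hsplit2, List.filter_append]
      set bs := (PySem.List.pyRange 1 (N : Int) 1).filter
        (fun i => decide (PySem.List.pyGetD array i 0 * 2 ≤ PySem.List.pyGetD array (i - 1) 0)) with hbs
      simp only [List.foldl_cons, List.foldl_nil, stepB]
      by_cases hb : PySem.List.pyGetD array (N : Int) 0 * 2 ≤ PySem.List.pyGetD array ((N : Int) - 1) 0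
      · have hcond : 0 < (N : Int) ∧ PySem.List.pyGetD array (N : Int) 0 * 2 ≤ PySem.List.pyGetD array ((N : Int) - 1) 0 :=
          ⟨by omega, hb⟩
        simp only [if_pos hcond, List.filter_cons, hb, decide_true, if_true, List.filter_nil]
        rw [pvAux_append]
        have hlast : ((bs ++ [((N : Nat) : Int)]).getLastD 0) = ((N : Nat) : Int) := by
          simp [List.getLastD_eq_getLast?]
        rw [hlast]
        have hN0 : (0 : Int) < ((N : Nat) : Int) := by exact_mod_cast hpos
        simp [hN0]
        exact fun h => absurd h (by omega)
      · have hcond : ¬ (0 < (N : Int) ∧ PySem.List.pyGetD array (N : Int) 0 * 2 ≤ PySem.List.pyGetD array ((N : Int) - 1) 0) := by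
          intro h; exact hb h.2
        simp only [if_neg hcond, List.filter_cons, hb, decide_false, if_false, List.filter_nil]
        simp

-- invariant for k ≥ 0: A's (count, left) is the pair-state fold's (total, run_start) plus the
-- pending closed-form contribution max(0, m - run_start - k) of the current open run
theorem pvInvNonneg (array : List Int) (k : Int) (hk : 0 ≤ k) (N : Nat) :
    (((PySem.List.pyRange 0 (N : Int) 1).foldl (stepA array k) (0, 0)).1
        = ((PySem.List.pyRange 0 (N : Int) 1).foldl (stepB array k) (0, 0)).1
          + max 0 ((N : Int) - ((PySem.List.pyRange 0 (N : Int) 1).foldl (stepB array k) (0, 0)).2 - k))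
    ∧ (((PySem.List.pyRange 0 (N : Int) 1).foldl (stepA array k) (0, 0)).2
        = ((PySem.List.pyRange 0 (N : Int) 1).foldl (stepB array k) (0, 0)).2
          + max 0 ((N : Int) - ((PySem.List.pyRange 0 (N : Int) 1).foldl (stepB array k) (0, 0)).2 - k))
    ∧ 0 ≤ ((PySem.List.pyRange 0 (N : Int) 1).foldl (stepB array k) (0, 0)).2
    ∧ ((PySem.List.pyRange 0 (N : Int) 1).foldl (stepB array k) (0, 0)).2 ≤ (N : Int) := by
  induction N with
  | zero =>
    simp [PySem.List.pyRange_one_eq_nil (by norm_num : (0:Int) ≤ 0)]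
    omega
  | succ N ih =>
    have hsplit : PySem.List.pyRange 0 ((N + 1 : Nat) : Int) 1
        = PySem.List.pyRange 0 (N : Int) 1 ++ [(N : Int)] := by
      push_cast
      exact PySem.List.pyRange_one_succ_right (by positivity)
    rw [hsplit, List.foldl_append, List.foldl_append]
    obtain ⟨h1, h2, h3, h4⟩ := ih
    set sA := (PySem.List.pyRange 0 (N : Int) 1).foldl (stepA array k) (0, 0) with hsA
    set sB := (PySem.List.pyRange 0 (N : Int) 1).foldl (stepB array k) (0, 0) with hsB
    simp only [List.foldl_cons, List.foldl_nil]
    unfold stepA stepB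
    by_cases hb : 0 < (N : Int) ∧ PySem.List.pyGetD array (N : Int) 0 * 2 ≤ PySem.List.pyGetD array ((N : Int) - 1) 0
    · simp only [if_pos hb]
      push_cast
      split_ifs <;> simp_all <;> omega
    · simp only [if_neg hb]
      push_cast
      split_ifs <;> simp_all <;> omega

-- for k < 0 A never counts: its count stays 0 and left stays within [0, m]
theorem pvInvNeg (array : List Int) (k : Int) (hk : k < 0) (N : Nat) :
    ((PySem.List.pyRange 0 (N : Int) 1).foldl (stepA array k) (0, 0)).1 = 0
    ∧ 0 ≤ ((PySem.List.pyRange 0 (N : Int) 1).foldl (stepA array k) (0, 0)).2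
    ∧ ((PySem.List.pyRange 0 (N : Int) 1).foldl (stepA array k) (0, 0)).2 ≤ (N : Int) := by
  induction N with
  | zero =>
    simp [PySem.List.pyRange_one_eq_nil (by norm_num : (0:Int) ≤ 0)]
  | succ N ih =>
    have hsplit : PySem.List.pyRange 0 ((N + 1 : Nat) : Int) 1
        = PySem.List.pyRange 0 (N : Int) 1 ++ [(N : Int)] := by
      push_cast
      exact PySem.List.pyRange_one_succ_right (by positivity)
    rw [hsplit, List.foldl_append]
    obtain ⟨h1, h2, h3⟩ := ih
    set sA := (PySem.List.pyRange 0 (N : Int) 1).foldl (stepA array k) (0, 0) with hsA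
    simp only [List.foldl_cons, List.foldl_nil]
    unfold stepA
    by_cases hb : 0 < (N : Int) ∧ PySem.List.pyGetD array (N : Int) 0 * 2 ≤ PySem.List.pyGetD array ((N : Int) - 1) 0
    · simp only [if_pos hb]
      push_cast
      split_ifs <;> simp_all <;> omega
    · simp only [if_neg hb]
      push_cast
      split_ifs <;> simp_all <;> omega

-- B's staged sum equals the pair-state fold closed with the final open run
theorem pvAltChar (array : List Int) (k : Int) (n : Int) (hk : ¬ k < 0) (hn : 0 < n) :
    count_alt array k n
      = ((PySem.List.pyRange 0 n 1).foldl (stepB array k) (0, 0)).1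
        + max 0 (n - ((PySem.List.pyRange 0 n 1).foldl (stepB array k) (0, 0)).2 - k) := by
  have hN : n = ((n.toNat : Nat) : Int) := by omega
  unfold count_alt
  rw [if_neg hk]
  rw [hN, pvBfold array k n.toNat]
  have hz := pvZipFoldl k 0
    (0 : Int)
    (((PySem.List.pyRange 1 ((n.toNat : Nat) : Int) 1).filter
        (fun i => decide (PySem.List.pyGetD array i 0 * 2 ≤ PySem.List.pyGetD array (i - 1) 0))) ++ [((n.toNat : Nat) : Int)])
  simp only [List.tail_cons] at hz ⊢
  rw [hz, pvAux_append]
  simp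

theorem count_eq_alt (array : List Int) (k : Int) (n : Int) :
    count array k n = count_alt array k n := by
  by_cases hk : k < 0
  · have hN : count array k n = 0 := by
      unfold count
      by_cases hn : n ≤ 0
      · rw [PySem.List.pyRange_one_eq_nil hn]; simp
      · have h : n = ((n.toNat : Nat) : Int) := by omega
        rw [h]; exact (pvInvNeg array k hk n.toNat).1
    rw [hN]; unfold count_alt; rw [if_pos hk]
  · by_cases hn : 0 < n
    · rw [pvAltChar array k n hk hn]
      have h : n = ((n.toNat : Nat) : Int) := by omega
      rw [h]
      exact (pvInvNonneg array k (by omega) n.toNat).1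
    · -- n ≤ 0: A's loop is empty; B sums max 0 (n - k) = 0
      unfold count count_alt
      rw [PySem.List.pyRange_one_eq_nil (by omega : n ≤ 0), if_neg hk,
          PySem.List.pyRange_one_eq_nil (by omega : n ≤ 1)]
      simp
      omega

-- ===== VERDICT (by name: the statement is the Claim_ definition above) =====
theorem count_spec : Claim_equal_count := by
  intro array k n _ _
  unfold Spec_count
  exact count_eq_alt array k n
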